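-- pv_equiv track=rewrite | github.com/sunflower-of-parchman/codespeak | codespeak/checker.py | _pre_rules
-- ===== SOURCE A (Python) =====
-- from typing import Dict, List, Optional, Tuple
--
-- def _pre_rules(words: List[str]) -> List[str]:
--     rewritten: List[str] = []
--     index = 0
--     while index < len(words):
--         current = words[index].lower()
--         if (
--             index + 1 < len(words)
--             and current in {"dash", "minus"}
--             and words[index + 1].lower() in {"dash", "minus"}
--         ):
--             rewritten.append("--")
--             index += 2
--             continue
--         if current == "slash":
--             rewritten.append("/")
--             index += 1
--             continue
--         rewritten.append(words[index])
--         index += 1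
--     return rewritten
-- ===== SOURCE B (Python) =====
-- from typing import List
--
-- def _pre_rules(words: List[str]) -> List[str]:
--     rewritten: List[str] = []
--     pending = None  # an unresolved dash/minus token, kept with its original case
--     for w in words:
--         lw = w.lower()
--         if pending is not None:
--             if lw in {"dash", "minus"}:
--                 rewritten.append("--")
--                 pending = None
--                 continue
--             rewritten.append(pending)
--             pending = None
--         if lw in {"dash", "minus"}:
--             pending = w
--         elif lw == "slash":
--             rewritten.append("/")
--         else:
--             rewritten.append(w)
--     if pending is not None:
--         rewritten.append(pending)
--     return rewritten
-- ===== Notes on version B (the rewrite author's own statement) =====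
-- stated objective: alternative
-- what changed: Replaces the while/index loop with explicit lookahead (words[index+1]) by a single for-loop carrying a 'pending' slot that holds an unresolved dash/minus token and is flushed or paired when the next token arrives (and once after the loop).
import Mathlib
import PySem

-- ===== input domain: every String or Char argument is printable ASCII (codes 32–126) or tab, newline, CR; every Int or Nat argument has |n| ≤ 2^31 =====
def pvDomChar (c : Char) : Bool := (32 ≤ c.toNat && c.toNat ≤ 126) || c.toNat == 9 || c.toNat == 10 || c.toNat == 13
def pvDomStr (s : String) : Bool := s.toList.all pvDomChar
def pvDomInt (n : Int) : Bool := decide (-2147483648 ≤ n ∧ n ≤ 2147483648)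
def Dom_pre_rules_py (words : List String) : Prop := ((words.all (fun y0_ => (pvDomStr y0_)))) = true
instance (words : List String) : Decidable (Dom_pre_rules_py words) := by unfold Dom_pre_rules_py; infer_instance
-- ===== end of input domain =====

-- B replaces A's while/index loop with lookahead by a single pass carrying a 'pending'
-- unresolved dash/minus token (objective: alternative decomposition, same cost).

-- ===== PORT A =====
-- A's while loop over `index` with lookahead `words[index + 1]` becomes structural
-- recursion on the remaining suffix; the lookahead is the second pattern element.
def pre_rules_py : List String → List String
  | [] => []
  | [w] =>
    let current := PySem.Str.lower w
    if current == "slash" then ["/"] else [w]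
  | w :: w2 :: rest =>
    let current := PySem.Str.lower w
    if (current == "dash" || current == "minus")
        && (PySem.Str.lower w2 == "dash" || PySem.Str.lower w2 == "minus") then
      "--" :: pre_rules_py rest
    else if current == "slash" then
      "/" :: pre_rules_py (w2 :: rest)
    else
      w :: pre_rules_py (w2 :: rest)

-- ===== PORT B =====
-- normal processing of one token (Source B's trailing if/elif/else)
def altNormal (acc : List String) (w : String) (lw : String) : List String × Option String :=
  if lw == "dash" || lw == "minus" then (acc, some w)
  else if lw == "slash" then (acc ++ ["/"], none)
  else (acc ++ [w], none)

-- one iteration of Source B's for loop over state (rewritten, pending)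
def altStep (st : List String × Option String) (w : String) : List String × Option String :=
  let lw := PySem.Str.lower w
  match st.2 with
  | some p =>
    if lw == "dash" || lw == "minus" then (st.1 ++ ["--"], none)
    else altNormal (st.1 ++ [p]) w lw
  | none => altNormal st.1 w lw

-- the post-loop flush of a remaining pending token
def altFinish (st : List String × Option String) : List String :=
  match st.2 with
  | some p => st.1 ++ [p]
  | none => st.1

def pre_rules_py_alt (words : List String) : List String :=
  altFinish (words.foldl altStep ([], none))

-- ===== PRECONDITION & SPEC =====
def Spec_pre_rules_py (words : List String) (out : List String) : Prop := out = pre_rules_py_alt words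
instance (words : List String) (out : List String) : Decidable (Spec_pre_rules_py words out) := by unfold Spec_pre_rules_py; infer_instance

-- ===== CLAIM (what is proved, stated in full; the proofs are below) =====
def Claim_equal_pre_rules_py : Prop := ∀ (words : List String), Dom_pre_rules_py words → Spec_pre_rules_py words (pre_rules_py words)

-- ===== LEMMAS AND PROOFS =====

theorem dash_ne_slash {s : String}
    (h : (s == "dash" || s == "minus") = true) : (s == "slash") = false := by
  rcases Bool.or_eq_true_iff.mp h with h' | h' <;>
    simp_all

-- A on a non-dash head emits its translation and recurses on the tail
theorem A_cons_not_dash (w : String) (rest : List String)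
    (h : (PySem.Str.lower w == "dash" || PySem.Str.lower w == "minus") = false) :
    pre_rules_py (w :: rest)
      = (if PySem.Str.lower w == "slash" then "/" else w) :: pre_rules_py rest := by
  cases rest with
  | nil => simp [pre_rules_py]; split <;> simp
  | cons w2 r => simp [pre_rules_py, h]; split <;> simp

-- A on dash-dash emits "--" and skips both
theorem A_dash_dash (w w2 : String) (rest : List String)
    (h1 : (PySem.Str.lower w == "dash" || PySem.Str.lower w == "minus") = true)
    (h2 : (PySem.Str.lower w2 == "dash" || PySem.Str.lower w2 == "minus") = true) :
    pre_rules_py (w :: w2 :: rest) = "--" :: pre_rules_py rest := by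
  simp [pre_rules_py, h1, h2]

-- A on a dash not followed by a dash emits the original token
theorem A_dash_not (w w2 : String) (rest : List String)
    (h1 : (PySem.Str.lower w == "dash" || PySem.Str.lower w == "minus") = true)
    (h2 : (PySem.Str.lower w2 == "dash" || PySem.Str.lower w2 == "minus") = false) :
    pre_rules_py (w :: w2 :: rest) = w :: pre_rules_py (w2 :: rest) := by
  simp [pre_rules_py, h1, h2, dash_ne_slash h1]

-- A on a trailing dash emits the original token
theorem A_dash_single (w : String)
    (h : (PySem.Str.lower w == "dash" || PySem.Str.lower w == "minus") = true) :
    pre_rules_py [w] = [w] := by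
  simp [pre_rules_py, dash_ne_slash h]

-- loop invariant: B's fold from (acc, none) resp. (acc, some p) with p a dash/minus
-- token computes acc ++ A's output of the remaining suffix (resp. p :: suffix)
theorem key (ws : List String) :
    (∀ acc, altFinish (ws.foldl altStep (acc, none)) = acc ++ pre_rules_py ws)
    ∧ (∀ acc p, (PySem.Str.lower p == "dash" || PySem.Str.lower p == "minus") = true →
        altFinish (ws.foldl altStep (acc, some p)) = acc ++ pre_rules_py (p :: ws)) := by
  induction ws with
  | nil =>
    refine ⟨fun acc => by simp [altFinish, pre_rules_py], fun acc p hp => ?_⟩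
    simp [altFinish, A_dash_single p hp]
  | cons w rest IH =>
    have hnone : ∀ acc,
        altFinish ((w :: rest).foldl altStep (acc, none)) = acc ++ pre_rules_py (w :: rest) := by
      intro acc
      by_cases hd : (PySem.Str.lower w == "dash" || PySem.Str.lower w == "minus") = true
      · simpa [List.foldl, altStep, altNormal, hd] using IH.2 acc w hd
      · rw [Bool.not_eq_true] at hd
        by_cases hs : (PySem.Str.lower w == "slash") = true
        · simp [List.foldl, altStep, altNormal, hd, hs, IH.1, A_cons_not_dash w rest hd]
        · rw [Bool.not_eq_true] at hs
          simp [List.foldl, altStep, altNormal, hd, hs, IH.1, A_cons_not_dash w rest hd]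
    refine ⟨hnone, fun acc p hp => ?_⟩
    by_cases hd : (PySem.Str.lower w == "dash" || PySem.Str.lower w == "minus") = true
    · simp [List.foldl, altStep, hd, IH.1, A_dash_dash p w rest hp hd]
    · rw [Bool.not_eq_true] at hd
      calc altFinish ((w :: rest).foldl altStep (acc, some p))
          = altFinish ((w :: rest).foldl altStep (acc ++ [p], none)) := by
            simp [List.foldl, altStep, hd]
        _ = (acc ++ [p]) ++ pre_rules_py (w :: rest) := hnone (acc ++ [p])
        _ = acc ++ pre_rules_py (p :: w :: rest) := by
            simp [A_dash_not p w rest hp hd]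

-- ===== VERDICT (by name: the statement is the Claim_ definition above) =====
theorem pre_rules_py_spec : Claim_equal_pre_rules_py := by
  intro words _
  unfold Spec_pre_rules_py pre_rules_py_alt
  simpa using ((key words).1 []).symm
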